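/-
  THE END THEOREM OF THE HEAP TOY: from the unit theorems to `ProgX.StaysInCode Toyh.image`.
  (The worked example of "how a program assembles its end theorem": ProgX/Top.lean; the first toy's: Toy/Final.lean.)

      image                  the `ProgX.Image` of the theorems: the file `imageBytes` (c/toyh/toyh.bin, Toyh/Image.lean) with this build's
                             symbols (Toyh/Symbols.lean: `__image_end`; entry, exit, report and the text window are the base's)
      text_of                the image is linked for the base's text record `ProgX.Base.T`
      image_isNat            `ImageIsNat image imageNat imageNat.size`: the whole file, as the number, is in the start state's memory
      baseIn                 THE IMAGE CONTAINS THE BASE (version 2: with the heap): its 20,480 bytes from 100000H are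
                             `ProgX.Base.baseTextNat` — one kernel-decided equality; with it the code of all 41 proved base functions,
                             the heap's eight among them, is in the start state (`allCode_of_baseIn`)
      allCode                `Toyh.Closed.AllCode` of the start state: the 2 + 1 program functions (one `FileHas` each, `by decide +kernel`)
                             and the two base functions the program's units are about or use generically (from `baseIn`)
      imageData              `Top.ImageData Toyh.Spec.rt image`: `.init_array` and the descriptor table are in the file
      stays_in_code_of       THE ASSEMBLY, with the units as hypotheses: the base's closed contracts (`ProgX.Base.Closed.closed`, proved
                             once in the shared package: 41 units, with `malloc` and `free`), the program's closed contracts (`hclosed`: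
                             Toyh/Closed.lean, generated by tools/mkclosed.py: the command is tools/mkclosed.toyh.sh), the stub (`hstub`),
                             `Top.staysInCode_of_stub`
      Toyh/FinalTheorem.lean `theorem toyh_stays_in_code : ProgX.StaysInCode Toyh.image`: the same with the unit theorems plugged in
                             (it imports every proof; this file imports the STATEMENTS only, so it builds before the units are proved)
-/
import ProgX.Base.ImageFacts
import Toyh.ClosedSpec
import Toyh.Image
import Toyh.Spec.Units.start
namespace Toyh
open X86 X86.User Asan ProgX

set_option exponentiation.threshold 2000000

/-! ### The image -/

/-- **The image of the theorems**: the bytes of c/toyh/toyh.bin with this build's symbols. -/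
noncomputable def image : ProgX.Image := symbols.image imageBytes

/-- The image of this build, for any file bytes, is linked for the base's text record: the window `[100000H, 140000H)`, the report
address 100059H. -/
theorem text_of (bytes : Array UInt8) : ProgX.Base.T.Of (symbols.image bytes) :=
  ⟨rfl, rfl, rfl⟩

/-- What link.ld asserts, for this build's symbols and any file of `n` bytes: four comparisons of numbers. (For a VARIABLE
`bytes`: at the instance all comparisons are syntactic; ProgX/ImageFacts.lean, KERNEL HYGIENE.) -/
theorem image_ok_of (bytes : Array UInt8) (n : Nat) (hsize : bytes.size = n)
    (h1 : 0x100000 + n ≤ symbols.image_end) (h2 : symbols.image_end ≤ 0x1F0000)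
    (h3 : ProgX.Base.symbols.text_cap ≤ 0x100000 + n) (h4 : 0x100000 ≤ ProgX.Base.symbols.text_cap) :
    (symbols.image bytes).OK := by
  subst hsize
  exact ⟨h1, h2, h3, h4⟩

/-- `ImageIsNat` for this build's symbols and any file with the two facts the generated Toyh/Image.lean proves of `imageBytes`. -/
theorem image_isNat_of (bytes : Array UInt8) (N sz : Nat) (hok : (symbols.image bytes).OK) (hsize : bytes.size = sz)
    (hnat : ∀ {mem : Mem} {base : Word}, CodeAt mem base bytes.toList → CodeNat mem base N sz) :
    ImageIsNat (symbols.image bytes) N sz :=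
  ImageIsNat.of_bytes hok hsize hnat

/-- **What link.ld asserts holds of the image.** -/
theorem image_ok : image.OK :=
  image_ok_of imageBytes imageNat.size imageBytes_size (by decide) (by decide) (by decide) (by decide)

/-- **The whole file, as the number, is in the start state's memory from 100000H.** -/
theorem image_isNat : ImageIsNat image imageNat imageNat.size :=
  image_isNat_of imageBytes imageNat imageNat.size image_ok imageBytes_size imageBytes_codeNat

/-! ### The code -/

/-- **The image contains the base**: the 20,480 bytes from 100000H are the base's text. -/
theorem baseIn : ProgX.Base.BaseIn imageNat imageNat.size := by
  decide +kernel

/-- **The code of every function a unit of the program is about is in the start state.** The program's own functions: the file has the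
function's number at its entry (a closed fact, decided by the kernel); the two base functions: from `baseIn`. -/
theorem allCode (c : Nat) (hc : c = 0 ∨ c = 3) (inp : List UInt8) :
    Closed.AllCode (startLayout c hc) (startU image c inp) where
  asan_register_globals := ProgX.Base.hasCode_of_baseIn image_isNat baseIn c hc inp ProgX.Base.baseHas_asan_register_globals
  run_ctors := ProgX.Base.hasCode_of_baseIn image_isNat baseIn c hc inp ProgX.Base.baseHas_run_ctors
  clamp_length := image_hasCode image_isNat c hc inp _ _ _ (by decide +kernel)
  sub_I_65535_1 := image_hasCode image_isNat c hc inp _ _ _ (by decide +kernel)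
  prog_main := image_hasCode image_isNat c hc inp _ _ _ (by decide +kernel)

/-! ### The data -/

/-- `.init_array` as numbers: one entry; the file has the address of `_sub_I_65535_1` there. -/
theorem ctor_numbers :
    Spec.rt.sym.initArrayEnd = Spec.rt.sym.initArrayStart + 8 ∧
    FileHas imageNat imageNat.size Spec.rt.sym.initArrayStart 8 Spec.rt.sym.ctor.toNat := by
  decide +kernel

/-- The descriptor table as numbers: the three quadwords of descriptor `i` in the file (one descriptor). -/
theorem descs_numbers : ∀ i (h : i < Spec.rt.descs.length),
    FileHas imageNat imageNat.size (Spec.rt.table + 64 * i) 8 Spec.rt.descs[i].beg ∧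
    FileHas imageNat imageNat.size (Spec.rt.table + 64 * i + 8) 8 Spec.rt.descs[i].size ∧
    FileHas imageNat imageNat.size (Spec.rt.table + 64 * i + 16) 8 Spec.rt.descs[i].sizeRz := by
  decide +kernel

/-- The slot of the one global lies inside the image. -/
theorem descs_in_image : ∀ d, d ∈ Spec.rt.descs → d.beg + d.sizeRz ≤ (image.imageEnd + 7) / 8 * 8 := by
  decide

/-- **What the composition needs to know about the image's data.** -/
theorem imageData : Top.ImageData Spec.rt image where
  ok := image_ok
  descs_ok := Globals.descs_ok
  descs_apart := Globals.descs_apart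
  descs_in := descs_in_image
  ctor := ctorIn_of image_isNat Spec.rt.sym ctor_numbers.1 ctor_numbers.2
  descs := descsIn_of image_isNat Spec.rt.table Spec.rt.descs descs_numbers

/-! ### The assembly -/

/-- **THE END THEOREM, from the units.** `hclosed`: the bottom-up composition of the program's `Calls` units over the base's closed
contracts (Toyh/Closed.lean) — among them the heap's `malloc` and `free`; `hstub`: the stub's unit. The base's contracts come from
the shared package, for THIS image, through the one fact `baseIn`. -/
theorem stays_in_code_of
    (hclosed : ∀ (Lay : Layout) (_ : Lay.hi = 0x1000000) (μ : Microarch) (_ : UserX.MicroOK μ) (u₀ : State),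
      Closed.AllCode Lay u₀ → ProgX.Base.Closed.Contracts Lay μ u₀ → Closed.Contracts Lay μ u₀)
    (hstub : Spec.start.Statement) : ProgX.StaysInCode image := by
  apply Top.staysInCode_of_stub (T := ProgX.Base.T) (R := Spec.rt) (text_of imageBytes) imageData
  intro μ hμ c hc inp
  have hLay := startLayout_hi c hc
  have hbase := ProgX.Base.Closed.closed (startLayout c hc) hLay μ hμ (startU image c inp)
    (ProgX.Base.allCode_of_baseIn image_isNat baseIn c hc inp)
  have hprog := hclosed (startLayout c hc) hLay μ hμ (startU image c inp) (allCode c hc inp) hbase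
  have hstart := ProgX.Base.hasCode_of_baseIn image_isNat baseIn c hc inp ProgX.Base.baseHas_start
  exact hstub (startLayout c hc) hLay μ hμ (startU image c inp) hstart hprog.run_ctors hprog.prog_main

end Toyh
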